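-- pv_equiv track=rewrite | github.com/pypi-data/pypi-mirror-383 | packages/magnet-pinn/magnet_pinn-0.0.11.tar.gz/magnet_pinn-0.0.11/magnet_pinn/utils/_perlin_noise.py | hasher
-- ===== SOURCE A (Python) =====
-- from typing import Dict, Iterable, List, Optional, Tuple, Union
--
-- def dot(
--     vec1: Union[List, Tuple],
--     vec2: Union[List, Tuple],
-- ) -> Union[float, int]:
--     """Two vectors dot product.
--
--     Parameters:
--         vec1: List[float] - first vector
--         vec2: List[float] - second vector
--
--     Returns:
--         Dot product of 2 vectors
--
--     Raises:
--         ValueError: if length not equal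
--     """
--     if len(vec1) != len(vec2):
--         raise ValueError("lengths of two vectors are not equal")
--     return sum([val1 * val2 for val1, val2 in zip(vec1, vec2)])
--
-- def hasher(
--     coordinates: Tuple[int, ...],
--     tile_sizes: Optional[Tuple[int, ...]] = None,
-- ) -> int:
--     """Hashes coordinates to integer number and use obtained number as seed.
--
--     Parameters:
--         coordinates: Tuple[int, ...] - tuple of coordinates
--         tile_sizes: Optional[Tuple[int, ...]] - optional tile sizes
--
--     Returns:
--         hash of coordinates in integer
--     """
--     if tile_sizes:
--         coordinates = tuple(
--             coors % tile for coors, tile in zip(coordinates, tile_sizes)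
--         )
--     # fmt: off
--     return max(
--         1,
--         int(
--             abs(
--                 dot([10**coordinate for coordinate in range(len(coordinates))], coordinates) + 1,  # noqa: E501, WPS221
--             ),
--         ),
--     )
-- ===== SOURCE B (Python) =====
-- def hasher(coordinates, tile_sizes=None):
--     if tile_sizes:
--         coordinates = tuple(c % t for c, t in zip(coordinates, tile_sizes))
--     acc = 0
--     for c in reversed(coordinates):
--         acc = acc * 10 + c
--     return max(1, abs(acc + 1))
-- ===== Notes on version B (the rewrite author's own statement) =====
-- stated objective: faster
-- what changed: Replaces the built power-of-10 weight list plus dot-product helper with a single Horner-rule pass over the reversed tuple (acc = acc*10 + c); no weight list or zip/dot call, and the big-integer 10**i powers are never materialised, only one bignum multiply-add per element.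
import Mathlib
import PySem

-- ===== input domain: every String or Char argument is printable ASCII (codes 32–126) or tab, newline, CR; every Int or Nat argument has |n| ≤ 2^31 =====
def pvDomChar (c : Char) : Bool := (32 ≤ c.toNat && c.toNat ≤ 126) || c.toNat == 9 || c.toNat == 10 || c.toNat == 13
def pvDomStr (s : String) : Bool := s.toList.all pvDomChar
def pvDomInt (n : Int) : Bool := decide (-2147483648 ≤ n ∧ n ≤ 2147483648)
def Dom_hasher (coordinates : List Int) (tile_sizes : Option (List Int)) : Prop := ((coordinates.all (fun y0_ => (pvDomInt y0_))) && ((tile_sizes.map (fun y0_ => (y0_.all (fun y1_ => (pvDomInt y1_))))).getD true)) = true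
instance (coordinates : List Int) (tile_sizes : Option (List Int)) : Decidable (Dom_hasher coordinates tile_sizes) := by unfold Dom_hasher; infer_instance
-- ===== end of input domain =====

-- B replaces the power-of-10 weight list + dot helper with one Horner-rule pass over the
-- reversed tuple; measurably faster (no big 10^i powers are built).

-- ===== PORT A =====
-- raise branch is unreachable at hasher's call site (lengths always equal); returns 0 there
def dot (vec1 : List Int) (vec2 : List Int) : Int :=
  if vec1.length ≠ vec2.length then 0
  else (List.zipWith (· * ·) vec1 vec2).sum

def hasher (coordinates : List Int) (tile_sizes : Option (List Int)) : Int :=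
  let coords :=
    match tile_sizes with
    | some ts => if ts ≠ [] then List.zipWith PySem.Int.mod coordinates ts else coordinates
    | none => coordinates
  max 1 |dot ((List.range coords.length).map (fun i => (10 : Int) ^ i)) coords + 1|

-- ===== PORT B =====
def hasher_alt (coordinates : List Int) (tile_sizes : Option (List Int)) : Int :=
  let coords :=
    match tile_sizes with
    | some ts => if ts ≠ [] then List.zipWith PySem.Int.mod coordinates ts else coordinates
    | none => coordinates
  let acc := coords.reverse.foldl (fun a c => a * 10 + c) 0
  max 1 |acc + 1|

-- ===== PRECONDITION & SPEC =====
-- Pre_ excludes only inputs on which Python A raises ZeroDivisionError: a zero tile size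
-- within the zip-truncated prefix (B raises there too).
def Pre_hasher (coordinates : List Int) (tile_sizes : Option (List Int)) : Prop :=
  ∀ ts, tile_sizes = some ts → (0 : Int) ∉ ts.take coordinates.length
instance (coordinates : List Int) (tile_sizes : Option (List Int)) : Decidable (Pre_hasher coordinates tile_sizes) := by unfold Pre_hasher; infer_instance

def pvWitness_hasher : List Int × Option (List Int) := ([3, -4, 7], some [5, 2])

def Spec_hasher (coordinates : List Int) (tile_sizes : Option (List Int)) (out : Int) : Prop := out = hasher_alt coordinates tile_sizes
instance (coordinates : List Int) (tile_sizes : Option (List Int)) (out : Int) : Decidable (Spec_hasher coordinates tile_sizes out) := by unfold Spec_hasher; infer_instance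

-- ===== CLAIM (what is proved, stated in full; the proofs are below) =====
def Claim_equal_hasher : Prop := ∀ (coordinates : List Int) (tile_sizes : Option (List Int)), Dom_hasher coordinates tile_sizes → Pre_hasher coordinates tile_sizes → Spec_hasher coordinates tile_sizes (hasher coordinates tile_sizes)

-- ===== LEMMAS AND PROOFS =====

-- Horner over the reversed list equals the weighted sum against 10^i.
theorem horner_eq_dot (l : List Int) :
    (List.zipWith (· * ·) ((List.range l.length).map (fun i => (10 : Int) ^ i)) l).sum
      = l.reverse.foldl (fun a c => a * 10 + c) 0 := by
  rw [List.foldl_reverse]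
  induction l with
  | nil => simp
  | cons c l ih =>
    simp only [List.length_cons, List.range_succ_eq_map, List.map_cons, List.map_map,
      List.zipWith_cons_cons, List.foldr_cons, List.sum_cons, pow_zero, one_mul]
    rw [← ih]
    simp only [List.zipWith_map_left]
    have h : List.zipWith (fun a b => ((fun i => (10 : Int) ^ i) ∘ Nat.succ) a * b)
          (List.range l.length) l
        = List.map (fun x => 10 * x)
            (List.zipWith (fun a b => (10 : Int) ^ a * b) (List.range l.length) l) := by
      rw [List.map_zipWith]
      congr 1
      funext a b
      simp [pow_succ]
      ring
    rw [h]
    rw [show (fun x : Int => 10 * x) = (fun x : Int => 10 * id x) from rfl]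
    rw [List.sum_map_mul_left]
    simp
    ring

theorem hasher_spec : Claim_equal_hasher := by
  intro coordinates tile_sizes _ _
  unfold Spec_hasher hasher hasher_alt dot
  simp only []
  rw [if_neg (by simp)]
  rw [horner_eq_dot]
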